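-- pv_equiv track=rewrite | github.com/adobrzhansky/docker-library-redis | release-automation/src/stackbrew_generator/stackbrew.py | _parse_stackbrew_entries
-- ===== SOURCE A (Python) =====
-- from typing import List
--
-- def _parse_stackbrew_entries(lines: List[str]) -> List[List[str]]:
--     """Parse stackbrew entries from lines, returning list of entry line groups.
--
--     Args:
--         lines: Lines to parse
--
--     Returns:
--         List of entry line groups
--     """
--     entries = []
--     current_entry = []
--
--     for line in lines:
--         line = line.rstrip()
--
--         if line.startswith('Tags:') and current_entry:
--             # Start of new entry, save the previous one
--             entries.append(current_entry)
--             current_entry = [line]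
--         elif line.startswith('Tags:'):
--             # First entry
--             current_entry = [line]
--         elif current_entry and (line.startswith(('Architectures:', 'GitCommit:', 'GitFetch:', 'Directory:')) or line.strip() == ''):
--             # Part of current entry
--             current_entry.append(line)
--         elif not line.strip() and not current_entry:
--             # Empty line before any entry starts, skip
--             continue
--         elif not line.strip() and current_entry:
--             # Empty line after entry content - end of entry
--             if current_entry:
--                 entries.append(current_entry)
--                 current_entry = []
--
--     # Don't forget the last entry
--     if current_entry:
--         entries.append(current_entry)
--
--     return entries
-- ===== SOURCE B (Python) =====
-- from typing import List
--
--
-- def _is_tag(line: str) -> bool: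
--     return line.startswith('Tags:')
--
--
-- def _keep(line: str) -> bool:
--     return (line.startswith(('Architectures:', 'GitCommit:', 'GitFetch:', 'Directory:'))
--             or line.strip() == '')
--
--
-- def _parse_stackbrew_entries(lines: List[str]) -> List[List[str]]:
--     """Parse stackbrew entries: rstrip everything, drop the prefix before the
--     first 'Tags:' line, then cut the rest into 'Tags:'-delimited segments and
--     keep only the recognised field lines / blank lines inside each segment."""
--     stripped = [l.rstrip() for l in lines]
--
--     # drop everything before the first 'Tags:' line
--     i = 0
--     while i < len(stripped) and not _is_tag(stripped[i]):
--         i += 1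
--     rest = stripped[i:]
--
--     entries = []
--     while rest:
--         head, tail = rest[0], rest[1:]
--         j = 0
--         while j < len(tail) and not _is_tag(tail[j]):
--             j += 1
--         entries.append([head] + [l for l in tail[:j] if _keep(l)])
--         rest = tail[j:]
--     return entries
-- ===== Notes on version B (the rewrite author's own statement) =====
-- stated objective: simpler
-- what changed: Replaces the single-pass accumulator state machine (five ordered branches over (entries, current_entry) state) with a delimiter-segmentation structure: rstrip all lines, drop the prefix before the first 'Tags:' line, then split the rest into 'Tags:'-delimited segments and filter each segment's body to the recognised field/blank lines.
import Mathlib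
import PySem

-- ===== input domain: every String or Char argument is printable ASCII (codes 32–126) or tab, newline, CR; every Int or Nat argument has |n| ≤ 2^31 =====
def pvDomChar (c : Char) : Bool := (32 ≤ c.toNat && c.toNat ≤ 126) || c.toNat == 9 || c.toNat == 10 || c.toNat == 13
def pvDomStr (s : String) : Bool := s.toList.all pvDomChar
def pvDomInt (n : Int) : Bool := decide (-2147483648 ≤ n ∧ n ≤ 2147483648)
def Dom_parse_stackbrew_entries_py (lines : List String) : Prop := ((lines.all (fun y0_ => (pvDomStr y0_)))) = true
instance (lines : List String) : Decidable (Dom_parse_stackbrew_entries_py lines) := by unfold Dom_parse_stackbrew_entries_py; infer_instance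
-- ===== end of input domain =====

-- B replaces A's single-pass accumulator state machine by a simpler 'Tags:'-delimited
-- segmentation (drop prefix, cut at delimiters, filter each segment); same cost, simpler.

-- ===== PORT A =====
-- one iteration of A's for-loop over the state (entries, current_entry)
def pvAStep (st : List (List String) × List String) (line0 : String) :
    List (List String) × List String :=
  let line := PySem.Str.rstrip line0
  if PySem.Str.startswith line "Tags:" && !st.2.isEmpty then
    (st.1 ++ [st.2], [line])
  else if PySem.Str.startswith line "Tags:" then
    (st.1, [line])
  else if !st.2.isEmpty &&
      (PySem.Str.startswith line "Architectures:" || PySem.Str.startswith line "GitCommit:" ||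
       PySem.Str.startswith line "GitFetch:" || PySem.Str.startswith line "Directory:" ||
       PySem.Str.strip line == "") then
    (st.1, st.2 ++ [line])
  else if PySem.Str.strip line == "" && st.2.isEmpty then
    st
  else if PySem.Str.strip line == "" && !st.2.isEmpty then
    (if !st.2.isEmpty then (st.1 ++ [st.2], ([] : List String)) else st)
  else
    st

def parse_stackbrew_entries_py (lines : List String) : List (List String) :=
  let st := lines.foldl pvAStep ([], [])
  if !st.2.isEmpty then st.1 ++ [st.2] else st.1

-- ===== PORT B =====
def pvIsTag (l : String) : Bool := PySem.Str.startswith l "Tags:"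

def pvKeep (l : String) : Bool :=
  PySem.Str.startswith l "Architectures:" || PySem.Str.startswith l "GitCommit:" ||
  PySem.Str.startswith l "GitFetch:" || PySem.Str.startswith l "Directory:" ||
  PySem.Str.strip l == ""

-- B's outer while loop: cut off one 'Tags:'-delimited segment, filter its body, recurse
def pvSegments : List String → List (List String)
  | [] => []
  | head :: tail =>
      (head :: (tail.takeWhile (fun l => !pvIsTag l)).filter pvKeep)
        :: pvSegments (tail.dropWhile (fun l => !pvIsTag l))
termination_by ls => ls.length
decreasing_by
  simp only [List.length_cons]
  exact Nat.lt_succ_of_le (List.length_dropWhile_le _ _)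

def parse_stackbrew_entries_py_alt (lines : List String) : List (List String) :=
  pvSegments ((lines.map PySem.Str.rstrip).dropWhile (fun l => !pvIsTag l))

-- ===== PRECONDITION & SPEC =====
def Spec_parse_stackbrew_entries_py (lines : List String) (out : List (List String)) : Prop := out = parse_stackbrew_entries_py_alt lines
instance (lines : List String) (out : List (List String)) : Decidable (Spec_parse_stackbrew_entries_py lines out) := by unfold Spec_parse_stackbrew_entries_py; infer_instance

-- ===== CLAIM (what is proved, stated in full; the proofs are below) =====
def Claim_equal_parse_stackbrew_entries_py : Prop := ∀ (lines : List String), Dom_parse_stackbrew_entries_py lines → Spec_parse_stackbrew_entries_py lines (parse_stackbrew_entries_py lines)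

-- ===== LEMMAS AND PROOFS =====

-- A's step on an already-rstripped line, with the two tests named
def pvAStep' (st : List (List String) × List String) (line : String) :
    List (List String) × List String :=
  if pvIsTag line && !st.2.isEmpty then
    (st.1 ++ [st.2], [line])
  else if pvIsTag line then
    (st.1, [line])
  else if !st.2.isEmpty && pvKeep line then
    (st.1, st.2 ++ [line])
  else if PySem.Str.strip line == "" && st.2.isEmpty then
    st
  else if PySem.Str.strip line == "" && !st.2.isEmpty then
    (if !st.2.isEmpty then (st.1 ++ [st.2], ([] : List String)) else st)
  else
    st

-- A's final 'if current_entry: entries.append(current_entry)'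
def pvFinal (st : List (List String) × List String) : List (List String) :=
  if !st.2.isEmpty then st.1 ++ [st.2] else st.1

-- invariant while an entry is open
theorem pvFoldOpen (ls : List String) (acc : List (List String)) (hd : String)
    (body : List String) :
    pvFinal (List.foldl pvAStep' (acc, hd :: body) ls)
      = acc ++ ((hd :: body) ++ (ls.takeWhile (fun l => !pvIsTag l)).filter pvKeep)
          :: pvSegments (ls.dropWhile (fun l => !pvIsTag l)) := by
  induction ls generalizing acc hd body with
  | nil => simp [pvFinal, pvSegments]
  | cons l t ih =>
    by_cases htag : pvIsTag l = true
    · have h1 : pvAStep' (acc, hd :: body) l = (acc ++ [hd :: body], [l]) := by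
        simp [pvAStep', htag]
      rw [List.foldl_cons, h1, ih]
      simp [htag, pvSegments]
    · have htag' : pvIsTag l = false := by simpa using htag
      by_cases hkeep : pvKeep l = true
      · have h1 : pvAStep' (acc, hd :: body) l = (acc, (hd :: body) ++ [l]) := by
          simp [pvAStep', htag', hkeep]
        rw [List.foldl_cons, h1]
        have := ih acc hd (body ++ [l])
        simp only [List.cons_append] at this ⊢
        rw [this]
        simp [htag', hkeep]
      · have hkeep' : pvKeep l = false := by simpa using hkeep
        have hstrip : (PySem.Str.strip l == "") = false := by
          cases h : (PySem.Str.strip l == "") with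
          | false => rfl
          | true => exfalso; simp [pvKeep, h] at hkeep'
        have h1 : pvAStep' (acc, hd :: body) l = (acc, hd :: body) := by
          simp [pvAStep', htag', hkeep', hstrip]
        rw [List.foldl_cons, h1, ih]
        simp [htag', hkeep']

-- invariant before the first entry opens
theorem pvFoldClosed (ls : List String) (acc : List (List String)) :
    pvFinal (List.foldl pvAStep' (acc, []) ls)
      = acc ++ pvSegments (ls.dropWhile (fun l => !pvIsTag l)) := by
  induction ls generalizing acc with
  | nil => simp [pvFinal, pvSegments]
  | cons l t ih =>
    by_cases htag : pvIsTag l = true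
    · have h1 : pvAStep' (acc, []) l = (acc, [l]) := by
        simp [pvAStep', htag]
      rw [List.foldl_cons, h1, pvFoldOpen]
      simp [htag, pvSegments]
    · have htag' : pvIsTag l = false := by simpa using htag
      have h1 : pvAStep' (acc, []) l = (acc, []) := by
        simp [pvAStep', htag']
      rw [List.foldl_cons, h1, ih]
      simp [htag']

-- ===== VERDICT (by name: the statement is the Claim_ definition above) =====
theorem parse_stackbrew_entries_py_spec : Claim_equal_parse_stackbrew_entries_py := by
  intro lines _
  unfold Spec_parse_stackbrew_entries_py parse_stackbrew_entries_py parse_stackbrew_entries_py_alt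
  have hmap : lines.foldl pvAStep ([], []) =
      (lines.map PySem.Str.rstrip).foldl pvAStep' ([], []) := by
    rw [List.foldl_map]
    rfl
  show pvFinal (lines.foldl pvAStep ([], [])) = _
  rw [hmap, pvFoldClosed]
  simp
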